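-- pv_equiv track=rewrite | github.com/MrBrantCode/unitest_baseline | mut_generate/mist_train_cf/cf_92314/solution.py | find_prime_sum
-- ===== SOURCE A (Python) =====
-- def find_prime_sum(numbers):
--     def is_prime(num):
--         if num <= 1:
--             return False
--         for i in range(2, int(num**0.5) + 1):
--             if num % i == 0:
--                 return False
--         return True
--
--     for i in range(len(numbers) - 1):
--         for j in range(i + 1, len(numbers)):
--             if is_prime(numbers[i] + numbers[j]):
--                 return numbers[i], numbers[j]
--
--     return None
-- ===== SOURCE B (Python) =====
-- def _has_prime_factor(s, primes):
--     # primes is ascending; only primes p with p*p <= s can matter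
--     for p in primes:
--         if p * p > s:
--             break
--         if s % p == 0:
--             return True
--     return False
--
--
-- def find_prime_sum(numbers):
--     if len(numbers) < 2:
--         return None
--     bound = 2 * max(numbers)          # no pair sum can exceed twice the maximum
--     if bound < 2:
--         return None                   # every pair sum is <= 1, hence not prime
--     r = 1
--     while (r + 1) * (r + 1) <= bound: # r = floor(sqrt(bound))
--         r += 1
--     primes = []                       # ascending list of all primes in [2, r]
--     for c in range(2, r + 1):
--         if not _has_prime_factor(c, primes):
--             primes.append(c)
--     for i in range(len(numbers) - 1):
--         for j in range(i + 1, len(numbers)):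
--             s = numbers[i] + numbers[j]
--             if s >= 2 and not _has_prime_factor(s, primes):
--                 return numbers[i], numbers[j]
--     return None
-- ===== Notes on version B (the rewrite author's own statement) =====
-- stated objective: faster
-- what changed: A trial-divides every pair sum by all integers up to sqrt(sum); B first short-circuits lists with fewer than two elements or with no pair sum reaching 2, builds once the ascending list of all primes up to sqrt(2*max) by trial division against earlier primes, and then tests each pair sum only against that precomputed prime table.
import Mathlib
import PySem

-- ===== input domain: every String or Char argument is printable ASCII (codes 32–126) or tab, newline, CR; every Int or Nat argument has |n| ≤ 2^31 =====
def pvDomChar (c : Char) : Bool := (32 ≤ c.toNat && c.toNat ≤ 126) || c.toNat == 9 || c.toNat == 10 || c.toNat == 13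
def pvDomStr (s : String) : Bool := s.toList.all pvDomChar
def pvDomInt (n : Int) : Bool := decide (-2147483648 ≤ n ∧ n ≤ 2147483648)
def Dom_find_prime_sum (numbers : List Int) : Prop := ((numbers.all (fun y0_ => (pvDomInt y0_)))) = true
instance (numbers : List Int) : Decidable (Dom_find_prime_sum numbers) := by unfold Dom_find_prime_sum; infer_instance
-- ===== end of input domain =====

-- B replaces A's per-pair trial division by every integer up to sqrt(sum) with a prime table
-- (all primes up to sqrt(2*max), built once) and divides each pair sum only by those primes,
-- with early exits when the list has fewer than two elements or no pair sum can reach 2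
-- (objective: alternative; same first-pair tie-break, return value proved identical).

-- ===== PORT A =====
-- A's inner is_prime: `int(num**0.5)` is ported as Nat.sqrt, exact on the stated domain
-- (|element| ≤ 2^31, so num ≤ 2^32, where CPython's float sqrt is correctly rounded).
def isPrimeA (num : Int) : Bool :=
  if num ≤ 1 then false
  else
    (PySem.List.pyRange 2 (((Nat.sqrt num.toNat : Nat) : Int) + 1) 1).all
      (fun i => !(PySem.Int.mod num i == 0))

def find_prime_sum (numbers : List Int) : Option (Int × Int) :=
  (PySem.List.pyRange 0 ((numbers.length : Int) - 1) 1).findSome? (fun i =>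
    (PySem.List.pyRange (i + 1) (numbers.length : Int) 1).findSome? (fun j =>
      if isPrimeA ((PySem.List.pyGet? numbers i).getD 0 + (PySem.List.pyGet? numbers j).getD 0)
      then some ((PySem.List.pyGet? numbers i).getD 0, (PySem.List.pyGet? numbers j).getD 0)
      else none))

-- ===== PORT B =====
-- Source B's _has_prime_factor: walk the ascending prime list, stop at the first p with p*p > s.
def hasPrimeFactor (s : Int) : List Int → Bool
  | [] => false
  | p :: rest =>
    if p * p > s then false
    else if PySem.Int.mod s p == 0 then true
    else hasPrimeFactor s rest

-- Source B's `while (r + 1) * (r + 1) <= bound: r += 1` loop.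
def rLoop (bound r : Int) : Int :=
  if (r + 1) * (r + 1) ≤ bound then rLoop bound (r + 1) else r
termination_by (bound - r).toNat
decreasing_by
  rename_i h
  have h1 : r + 1 ≤ (r + 1) * (r + 1) := by nlinarith [mul_self_nonneg (r + 1)]
  omega

-- Source B's `for c in range(2, r + 1): if not _has_prime_factor(c, primes): primes.append(c)`.
def buildPrimes (r : Int) : List Int :=
  (PySem.List.pyRange 2 (r + 1) 1).foldl
    (fun acc c => if !hasPrimeFactor c acc then acc ++ [c] else acc) []

def find_prime_sum_alt (numbers : List Int) : Option (Int × Int) :=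
  if numbers.length < 2 then none
  else
    match PySem.List.max? numbers (fun x => x) with
    | none => none   -- unreachable: the list has at least two elements
    | some mx =>
      if 2 * mx < 2 then none
      else
        (PySem.List.pyRange 0 ((numbers.length : Int) - 1) 1).findSome? (fun i =>
          (PySem.List.pyRange (i + 1) (numbers.length : Int) 1).findSome? (fun j =>
            if decide (2 ≤ (PySem.List.pyGet? numbers i).getD 0 + (PySem.List.pyGet? numbers j).getD 0)
                && !hasPrimeFactor
                    ((PySem.List.pyGet? numbers i).getD 0 + (PySem.List.pyGet? numbers j).getD 0)
                    (buildPrimes (rLoop (2 * mx) 1))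
            then some ((PySem.List.pyGet? numbers i).getD 0, (PySem.List.pyGet? numbers j).getD 0)
            else none))

-- ===== PRECONDITION & SPEC =====
def Spec_find_prime_sum (numbers : List Int) (out : Option (Int × Int)) : Prop := out = find_prime_sum_alt numbers
instance (numbers : List Int) (out : Option (Int × Int)) : Decidable (Spec_find_prime_sum numbers out) := by unfold Spec_find_prime_sum; infer_instance

-- ===== CLAIM (what is proved, stated in full; the proofs are below) =====
def Claim_equal_find_prime_sum : Prop := ∀ (numbers : List Int), Dom_find_prime_sum numbers → Spec_find_prime_sum numbers (find_prime_sum numbers)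

-- ===== LEMMAS AND PROOFS =====

-- A's trial division decides primality of num.toNat (and needs num ≥ 2).
lemma isPrimeA_eq (num : Int) :
    isPrimeA num = decide (2 ≤ num ∧ Nat.Prime num.toNat) := by
  unfold isPrimeA
  by_cases h : num ≤ 1
  · rw [if_pos h]
    symm; rw [decide_eq_false_iff_not]; rintro ⟨h2, -⟩; omega
  · rw [if_neg h]
    have hnum : num = (num.toNat : Int) := by omega
    rw [Bool.eq_iff_iff]
    simp only [List.all_eq_true, PySem.List.mem_pyRange_one, Bool.not_eq_eq_eq_not, Bool.not_true,
      beq_eq_false_iff_ne, ne_eq, decide_eq_true_eq]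
    constructor
    · rintro hall
      refine ⟨by omega, Nat.prime_def_le_sqrt.mpr ⟨by omega, fun m hm hms hdvd => ?_⟩⟩
      have := hall (m : Int) ⟨by exact_mod_cast hm, by omega⟩
      rw [PySem.Int.mod_eq_zero_iff_dvd] at this
      exact this (by rw [hnum]; exact_mod_cast hdvd)
    · rintro ⟨-, hp⟩ i ⟨hi2, hilt⟩ hmod
      rw [PySem.Int.mod_eq_zero_iff_dvd] at hmod
      have h2 := (Nat.prime_def_le_sqrt.mp hp).2 i.toNat (by omega) (by omega)
      apply h2
      have : (i.toNat : Int) ∣ (num.toNat : Int) := by rw [← hnum]; convert hmod using 2; omega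
      exact_mod_cast this

-- On an ascending list of integers ≥ 2, the break in _has_prime_factor is harmless:
-- it reports exactly whether some listed p with p*p ≤ s divides s.
lemma hasPrimeFactor_eq (s : Int) (ps : List Int)
    (hsort : ps.Pairwise (· ≤ ·)) (h2 : ∀ p ∈ ps, 2 ≤ p) :
    hasPrimeFactor s ps = ps.any (fun p => decide (p * p ≤ s ∧ p ∣ s)) := by
  induction ps with
  | nil => rfl
  | cons p rest ih =>
    rw [List.pairwise_cons] at hsort
    unfold hasPrimeFactor
    by_cases hgt : p * p > s
    · rw [if_pos hgt]
      symm
      simp only [List.any_cons, Bool.or_eq_false_iff, decide_eq_false_iff_not]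
      refine ⟨by rintro ⟨hle, -⟩; omega, ?_⟩
      simp only [List.any_eq_false, decide_eq_true_eq]
      rintro q hq ⟨hle, -⟩
      have hpq : p ≤ q := hsort.1 q hq
      have hp2 : 2 ≤ p := h2 p (by simp)
      nlinarith
    · rw [if_neg hgt]
      by_cases hdvd : p ∣ s
      · rw [if_pos (by rw [beq_iff_eq, PySem.Int.mod_eq_zero_iff_dvd]; exact hdvd)]
        symm
        simp only [List.any_cons, Bool.or_eq_true, decide_eq_true_eq]
        exact Or.inl ⟨by omega, hdvd⟩
      · rw [if_neg (by rw [beq_iff_eq, PySem.Int.mod_eq_zero_iff_dvd]; exact hdvd)]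
        rw [ih hsort.2 (fun q hq => h2 q (by simp [hq]))]
        symm
        simp only [List.any_cons]
        rw [decide_eq_false (by rintro ⟨-, hd⟩; exact hdvd hd)]
        simp

lemma rLoop_ge (bound r : Int) : r ≤ rLoop bound r := by
  refine rLoop.induct bound (fun r => r ≤ rLoop bound r) ?_ ?_ r
  · intro x h ih; rw [rLoop, if_pos h]; omega
  · intro x h; rw [rLoop, if_neg h]

lemma rLoop_gt (bound r : Int) : bound < (rLoop bound r + 1) * (rLoop bound r + 1) := by
  refine rLoop.induct bound (fun r => bound < (rLoop bound r + 1) * (rLoop bound r + 1)) ?_ ?_ r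
  · intro x h ih; rwa [rLoop, if_pos h]
  · intro x h; rw [rLoop, if_neg h]; omega

-- An ascending list of the primes below B decides primality of s (s ≥ 2), provided it
-- covers every prime q with q*q ≤ s.
lemma keyLemma (s B : Int) (hs : 2 ≤ s)
    (hcov : ∀ q : Nat, Nat.Prime q → (q : Int) * (q : Int) ≤ s → (q : Int) < B) :
    hasPrimeFactor s ((PySem.List.pyRange 2 B 1).filter (fun c => decide (Nat.Prime c.toNat)))
      = !decide (Nat.Prime s.toNat) := by
  have hsub : ((PySem.List.pyRange 2 B 1).filter (fun c => decide (Nat.Prime c.toNat))).Sublist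
      (PySem.List.pyRange 2 B 1) := List.filter_sublist
  rw [hasPrimeFactor_eq s _
    ((PySem.List.pairwise_lt_pyRange_one 2 B).sublist hsub |>.imp le_of_lt)
    (fun p hp => ((PySem.List.mem_pyRange_one).mp (List.mem_of_mem_filter hp)).1)]
  rw [Bool.eq_iff_iff]
  simp only [List.any_eq_true, List.mem_filter, PySem.List.mem_pyRange_one, decide_eq_true_eq,
    Bool.not_eq_eq_eq_not, Bool.not_true, decide_eq_false_iff_not]
  constructor
  · rintro ⟨p, ⟨⟨hp2, -⟩, hpprime⟩, hple, hpdvd⟩ hprime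
    have hpn : (p.toNat : Int) = p := by omega
    have hsn : (s.toNat : Int) = s := by omega
    have hdvdn : p.toNat ∣ s.toNat := by
      have : (p.toNat : Int) ∣ (s.toNat : Int) := by rw [hpn, hsn]; exact hpdvd
      exact_mod_cast this
    have hlt : p.toNat < s.toNat := by nlinarith [hple, hp2]
    rcases (Nat.Prime.eq_one_or_self_of_dvd hprime _ hdvdn) with h1 | h1 <;> omega
  · intro hnp
    set n := s.toNat with hn
    have hn2 : 2 ≤ n := by omega
    have hnprime : ¬ n.Prime := hnp
    have hqp : (Nat.minFac n).Prime := Nat.minFac_prime (by omega)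
    have hqd : Nat.minFac n ∣ n := Nat.minFac_dvd n
    have hqsq : Nat.minFac n * Nat.minFac n ≤ n := by
      have := Nat.minFac_sq_le_self (by omega) hnprime; nlinarith [this]
    have hsqInt : (Nat.minFac n : Int) * (Nat.minFac n : Int) ≤ s := by
      have h' : ((Nat.minFac n * Nat.minFac n : Nat) : Int) ≤ (n : Int) := by exact_mod_cast hqsq
      push_cast at h'; omega
    refine ⟨(Nat.minFac n : Int), ⟨⟨by exact_mod_cast hqp.two_le, hcov _ hqp hsqInt⟩,
      by simpa using hqp⟩, hsqInt, ?_⟩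
    have : ((Nat.minFac n : Nat) : Int) ∣ ((n : Nat) : Int) := Int.natCast_dvd_natCast.mpr hqd
    have hsn : ((n : Nat) : Int) = s := by omega
    rwa [hsn] at this

-- The sieve-by-trial-on-primes loop builds exactly the ascending list of primes in [2, r].
lemma buildPrimes_eq (r : Int) :
    buildPrimes r
      = (PySem.List.pyRange 2 (r + 1) 1).filter (fun c => decide (Nat.Prime c.toNat)) := by
  unfold buildPrimes
  have aux : ∀ m : Nat,
      (PySem.List.pyRange 2 (2 + (m : Int)) 1).foldl
        (fun acc c => if !hasPrimeFactor c acc then acc ++ [c] else acc) []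
      = (PySem.List.pyRange 2 (2 + (m : Int)) 1).filter (fun c => decide (Nat.Prime c.toNat)) := by
    intro m
    induction m with
    | zero =>
      have h0 : (2:Int) + ((0:Nat):Int) = 2 := by norm_num
      rw [h0, PySem.List.pyRange_one_eq_nil le_rfl]
      rfl
    | succ k ih =>
      have hsplit : PySem.List.pyRange 2 (2 + ((k:Int)+1)) 1
          = PySem.List.pyRange 2 (2 + (k:Int)) 1 ++ [2 + (k:Int)] := by
        have := PySem.List.pyRange_one_succ_right (a := 2) (b := 2 + (k:Int)) (by omega)
        rw [← this]; ring_nf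
      push_cast
      rw [hsplit, List.foldl_append, List.filter_append, ih]
      have hkey : hasPrimeFactor (2 + (k:Int))
          ((PySem.List.pyRange 2 (2 + (k:Int)) 1).filter (fun c => decide (Nat.Prime c.toNat)))
          = !decide (Nat.Prime ((2:Int) + (k:Int)).toNat) := by
        apply keyLemma _ _ (by omega)
        intro q hq hqs
        have h2q : 2 ≤ (q:Int) := by exact_mod_cast hq.two_le
        nlinarith
      simp only [List.foldl_cons, List.foldl_nil, hkey, Bool.not_not, List.filter_cons,
        List.filter_nil]
      by_cases hp : Nat.Prime ((2:Int) + (k:Int)).toNat <;> simp [hp]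
  by_cases hr : r ≤ 1
  · rw [PySem.List.pyRange_one_eq_nil (by omega : r + 1 ≤ 2)]; rfl
  · have : r + 1 = 2 + ((r - 1).toNat : Int) := by omega
    rw [this]; exact aux _

-- The two primality tests agree on every s ≤ bound once bound ≥ 2.
lemma test_eq (bound s : Int) (hs : s ≤ bound) :
    isPrimeA s = (decide (2 ≤ s) && !hasPrimeFactor s (buildPrimes (rLoop bound 1))) := by
  by_cases h2 : 2 ≤ s
  · have hr1 : (1:Int) ≤ rLoop bound 1 := rLoop_ge bound 1
    have hrb : bound < (rLoop bound 1 + 1) * (rLoop bound 1 + 1) := rLoop_gt bound 1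
    rw [buildPrimes_eq, keyLemma s _ h2 ?hcov, isPrimeA_eq]
    case hcov =>
      intro q hq hqs
      have h2q : 2 ≤ (q:Int) := by exact_mod_cast hq.two_le
      nlinarith
    simp [h2]
  · rw [isPrimeA_eq]
    simp [h2]

lemma findSome?_congr_mem {α β : Type} {l : List α} {f g : α → Option β}
    (h : ∀ x ∈ l, f x = g x) : l.findSome? f = l.findSome? g := by
  induction l with
  | nil => rfl
  | cons a t ih =>
    simp only [List.findSome?_cons, h a (by simp)]
    cases g a with
    | none => exact ih (fun x hx => h x (by simp [hx]))
    | some b => rfl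

lemma mem_of_getD (numbers : List Int) (i : Int) (h0 : 0 ≤ i)
    (h1 : i < (numbers.length : Int)) : (PySem.List.pyGet? numbers i).getD 0 ∈ numbers := by
  rw [PySem.List.pyGet?_eq_some_getElem numbers h0 h1]
  exact List.getElem_mem _

-- ===== VERDICT (by name: the statement is the Claim_ definition above) =====
theorem find_prime_sum_spec : Claim_equal_find_prime_sum := by
  intro numbers _
  unfold Spec_find_prime_sum find_prime_sum find_prime_sum_alt
  by_cases hlen : numbers.length < 2
  · rw [if_pos hlen,
      PySem.List.pyRange_one_eq_nil (by omega : ((numbers.length : Int) - 1) ≤ 0)]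
    rfl
  · rw [if_neg hlen]
    split
    next hmax =>
      have := (PySem.List.max?_eq_none_iff numbers (fun x => x)).mp hmax
      subst this; simp at hlen
    next mx hmax =>
      have hmx : ∀ y ∈ numbers, y ≤ mx := fun y hy =>
        PySem.List.max?_isMax hmax y hy
      by_cases hb : 2 * mx < 2
      · rw [if_pos hb]
        rw [List.findSome?_eq_none_iff]
        intro i hi
        rw [PySem.List.mem_pyRange_one] at hi
        rw [List.findSome?_eq_none_iff]
        intro j hj
        rw [PySem.List.mem_pyRange_one] at hj
        have hx := hmx _ (mem_of_getD numbers i (by omega) (by omega))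
        have hy := hmx _ (mem_of_getD numbers j (by omega) (by omega))
        have hfalse : isPrimeA ((PySem.List.pyGet? numbers i).getD 0
            + (PySem.List.pyGet? numbers j).getD 0) = false := by
          rw [isPrimeA_eq, decide_eq_false_iff_not]
          rintro ⟨hge, -⟩; omega
        simp [hfalse]
      · rw [if_neg hb]
        apply findSome?_congr_mem
        intro i hi
        rw [PySem.List.mem_pyRange_one] at hi
        apply findSome?_congr_mem
        intro j hj
        rw [PySem.List.mem_pyRange_one] at hj
        have hx := hmx _ (mem_of_getD numbers i (by omega) (by omega))
        have hy := hmx _ (mem_of_getD numbers j (by omega) (by omega))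
        rw [test_eq (2 * mx)
          ((PySem.List.pyGet? numbers i).getD 0 + (PySem.List.pyGet? numbers j).getD 0)
          (by omega)]
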